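-- pv_equiv track=rewrite | github.com/chasehult/padbot-cogs | dungeon/view/dungeon.py | indent
-- ===== SOURCE A (Python) =====
-- def indent(level):
--     """
--     Helper function that indents text for the embed
--     """
--     ret = ""
--     for l in range(level):
--         if l == 0:
--             ret += "> "
--         else:
--             ret += "\u200b \u200b \u200b \u200b \u200b "
--     return ret
-- ===== SOURCE B (Python) =====
-- def indent(level):
--     """
--     Helper function that indents text for the embed
--     """
--     if level <= 0:
--         return ""
--     return "> " + "\u200b \u200b \u200b \u200b \u200b " * (level - 1)
-- ===== Notes on version B (the rewrite author's own statement) =====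
-- stated objective: simpler
-- what changed: Replaced the per-index loop with a branch inside by a guard plus closed-form string multiplication of the spacer.
import Mathlib
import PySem

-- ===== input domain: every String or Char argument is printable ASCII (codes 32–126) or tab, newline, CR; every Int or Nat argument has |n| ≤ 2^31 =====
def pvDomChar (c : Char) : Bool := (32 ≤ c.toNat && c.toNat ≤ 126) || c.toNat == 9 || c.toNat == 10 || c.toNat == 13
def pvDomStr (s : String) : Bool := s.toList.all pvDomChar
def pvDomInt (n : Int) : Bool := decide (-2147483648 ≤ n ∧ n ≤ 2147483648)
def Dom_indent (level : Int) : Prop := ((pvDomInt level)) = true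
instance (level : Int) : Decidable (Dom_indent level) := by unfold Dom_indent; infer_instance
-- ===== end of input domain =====

-- ===== PORT A =====
def indent (level : Int) : String :=
  (PySem.List.pyRange 0 level 1).foldl
    (fun ret l => if l == 0 then ret ++ "> " else ret ++ "\u200b \u200b \u200b \u200b \u200b ") ""

-- ===== PORT B =====
-- B: guard + closed-form string multiplication of the spacer (one honest line).
def repStr (s : String) : Nat → String
  | 0 => ""
  | k + 1 => repStr s k ++ s

def indent_alt (level : Int) : String :=
  if level ≤ 0 then "" else "> " ++ repStr "\u200b \u200b \u200b \u200b \u200b " (level - 1).toNat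

-- ===== PRECONDITION & SPEC =====
def Spec_indent (level : Int) (out : String) : Prop := out = indent_alt level
instance (level : Int) (out : String) : Decidable (Spec_indent level out) := by unfold Spec_indent; infer_instance

-- ===== CLAIM (what is proved, stated in full; the proofs are below) =====
def Claim_equal_indent : Prop := ∀ (level : Int), Dom_indent level → Spec_indent level (indent level)

-- ===== LEMMAS AND PROOFS =====

-- ===== VERDICT (by name: the statement is the Claim_ definition above) =====
theorem aux_range (n : Nat) :
    ((List.range (n+1)).map (fun k : Nat => (0:Int) + k)).foldl
      (fun ret l => if l == 0 then ret ++ "> " else ret ++ "\u200b \u200b \u200b \u200b \u200b ") ""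
    = "> " ++ repStr "\u200b \u200b \u200b \u200b \u200b " n := by
  induction n with
  | zero => decide
  | succ m ih =>
    rw [List.range_succ, List.map_append, List.foldl_append, ih]
    have hne : ((m : Int) + 1) ≠ 0 := by omega
    simp [repStr, hne, String.append_assoc]

theorem indent_spec : Claim_equal_indent := by
  intro level _
  unfold Spec_indent indent indent_alt
  rw [PySem.List.pyRange_one]
  by_cases h : level ≤ 0
  · have h0 : (level - 0).toNat = 0 := by omega
    rw [h0]
    simp [h]
  · have h1 : (level - 0).toNat = (level - 1).toNat + 1 := by omega
    rw [h1, aux_range]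
    simp [h]
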